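-- pv_equiv track=rewrite | github.com/w0rdsm1th/Project_Euler | q53.py | q53
-- ===== SOURCE A (Python) =====
-- import math
--
-- def n_choose_r(n, r):
--     # return math.factorial(n) / (math.factorial(r) * math.factorial(n - r))
--     # integer division "//" suggested in https://stackoverflow.com/a/4941846/3596968
--     return math.factorial(n) // (math.factorial(r) * math.factorial(n - r))
--
-- def q53(n_limit, threshold):
--     n_start = 1
--     over_threshold_combinations = []
--     for n in range(n_start, n_limit+1):
--         for r in range(1, n):
--             if n_choose_r(n, r) > threshold:
--                 over_threshold_combinations.append((n, r))
--     return over_threshold_combinations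
-- ===== SOURCE B (Python) =====
-- def q53(n_limit, threshold):
--     # Incremental Pascal's triangle: each row of binomial coefficients is built
--     # from the previous one by additions, instead of recomputing factorials.
--     res = []
--     row = [1]  # row n-1 of Pascal's triangle
--     for n in range(1, n_limit + 1):
--         row = [1] + [row[i - 1] + row[i] for i in range(1, n)] + [1]
--         for r in range(1, n):
--             if row[r] > threshold:
--                 res.append((n, r))
--     return res
-- ===== Notes on version B (the rewrite author's own statement) =====
-- stated objective: faster
-- what changed: Replaces per-(n,r) factorial computation with rows of Pascal's triangle built incrementally by additions from the previous row.
import Mathlib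
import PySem

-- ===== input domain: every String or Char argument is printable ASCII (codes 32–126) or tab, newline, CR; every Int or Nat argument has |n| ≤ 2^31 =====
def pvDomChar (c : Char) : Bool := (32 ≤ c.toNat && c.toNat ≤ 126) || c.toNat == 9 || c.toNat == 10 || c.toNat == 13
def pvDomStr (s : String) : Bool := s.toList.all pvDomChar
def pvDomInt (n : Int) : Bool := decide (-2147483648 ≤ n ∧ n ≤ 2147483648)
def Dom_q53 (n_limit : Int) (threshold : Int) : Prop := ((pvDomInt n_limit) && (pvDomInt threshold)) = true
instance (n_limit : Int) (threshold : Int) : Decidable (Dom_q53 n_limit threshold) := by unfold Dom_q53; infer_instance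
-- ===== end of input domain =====

-- B replaces A's per-pair factorial formula by incrementally built Pascal's-triangle rows (faster).

-- ===== PORT A =====
-- math.factorial is only ever called with nonnegative arguments here (0 ≤ r ≤ n), where
-- Nat.factorial of .toNat is exact.
def n_choose_r (n r : Int) : Int :=
  PySem.Int.floordiv (n.toNat.factorial : Int)
    ((r.toNat.factorial : Int) * ((n - r).toNat.factorial : Int))

def q53 (n_limit : Int) (threshold : Int) : List (Int × Int) :=
  (PySem.List.pyRange 1 (n_limit + 1) 1).foldl
    (fun acc n =>
      (PySem.List.pyRange 1 n 1).foldl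
        (fun acc2 r => if n_choose_r n r > threshold then acc2 ++ [(n, r)] else acc2) acc)
    []

-- ===== PORT B =====
def q53_alt (n_limit : Int) (threshold : Int) : List (Int × Int) :=
  ((PySem.List.pyRange 1 (n_limit + 1) 1).foldl
    (fun st n =>
      let row := [1] ++ ((PySem.List.pyRange 1 n 1).map
        (fun i => PySem.List.pyGetD st.1 (i - 1) 0 + PySem.List.pyGetD st.1 i 0)) ++ [1]
      (row,
        (PySem.List.pyRange 1 n 1).foldl
          (fun res r => if PySem.List.pyGetD row r 0 > threshold then res ++ [(n, r)] else res)
          st.2))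
    (([1] : List Int), ([] : List (Int × Int)))).2

-- ===== PRECONDITION & SPEC =====
def Spec_q53 (n_limit : Int) (threshold : Int) (out : List (Int × Int)) : Prop := out = q53_alt n_limit threshold
instance (n_limit : Int) (threshold : Int) (out : List (Int × Int)) : Decidable (Spec_q53 n_limit threshold out) := by unfold Spec_q53; infer_instance

-- ===== CLAIM (what is proved, stated in full; the proofs are below) =====
def Claim_equal_q53 : Prop := ∀ (n_limit : Int) (threshold : Int), Dom_q53 n_limit threshold → Spec_q53 n_limit threshold (q53 n_limit threshold)

-- ===== LEMMAS AND PROOFS =====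

-- Pascal's-triangle row n, as Ints.
def chooseRowI (n : Nat) : List Int := (List.range (n + 1)).map (fun r => ((n.choose r : Nat) : Int))

-- The pairs contributed by one value of n.
def gRow (t : Int) (n : Int) : List (Int × Int) :=
  ((PySem.List.pyRange 1 n 1).filter
      (fun r => decide (t < ((n.toNat.choose r.toNat : Nat) : Int)))).map (fun r => (n, r))

lemma ncr_eq (n r : Int) (h0 : 0 ≤ r) (h1 : r ≤ n) :
    n_choose_r n r = ((n.toNat.choose r.toNat : Nat) : Int) := by
  have hK : (n - r).toNat = n.toNat - r.toNat := by omega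
  have hR : r.toNat ≤ n.toNat := by omega
  unfold n_choose_r
  rw [hK, ← Nat.cast_mul, PySem.Int.floordiv_natCast]
  congr 1
  have h := Nat.choose_mul_factorial_mul_factorial hR
  exact Nat.div_eq_of_eq_mul_left (by positivity) (by rw [← h]; ring)

lemma innerA (t : Int) (n : Int) (acc : List (Int × Int)) :
    (PySem.List.pyRange 1 n 1).foldl
      (fun acc2 r => if n_choose_r n r > t then acc2 ++ [(n, r)] else acc2) acc
    = acc ++ gRow t n := by
  have hfun : (fun (acc2 : List (Int × Int)) r => if n_choose_r n r > t then acc2 ++ [(n, r)] else acc2)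
      = (fun (acc2 : List (Int × Int)) r => if decide (n_choose_r n r > t) = true then acc2 ++ [(n, r)] else acc2) := by
    funext acc2 r; simp
  rw [hfun, PySem.List.foldl_append_if]
  unfold gRow
  congr 1
  congr 1
  apply List.filter_congr
  intro r hr
  rw [PySem.List.mem_pyRange_one] at hr
  rw [ncr_eq n r (by omega) (by omega)]

lemma rowLemma (m : Nat) :
    [1] ++ ((PySem.List.pyRange 1 ((m : Int) + 1) 1).map
      (fun i => PySem.List.pyGetD (chooseRowI m) (i - 1) 0 + PySem.List.pyGetD (chooseRowI m) i 0)) ++ [1]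
    = chooseRowI (m + 1) := by
  have hrange : PySem.List.pyRange 1 ((m : Int) + 1) 1
      = (List.range m).map (fun k : Nat => (1 + (k:Int))) := by
    rw [PySem.List.pyRange_one]
    have : ((m : Int) + 1 - 1).toNat = m := by omega
    rw [this]
  rw [hrange, List.map_map]
  have hmap : ∀ k ∈ List.range m,
      ((fun i => PySem.List.pyGetD (chooseRowI m) (i - 1) 0 + PySem.List.pyGetD (chooseRowI m) i 0) ∘
        (fun k : Nat => (1 + (k:Int)))) k
      = (((m + 1).choose (k + 1) : Nat) : Int) := by
    intro k hk
    rw [List.mem_range] at hk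
    have h1 : (1 + (k:Int) - 1) = ((k : Nat) : Int) := by ring
    have h2 : (1 + (k:Int)) = (((k + 1 : Nat)) : Int) := by push_cast; ring
    show PySem.List.pyGetD (chooseRowI m) (1 + (k:Int) - 1) 0 + PySem.List.pyGetD (chooseRowI m) (1 + (k:Int)) 0 = _
    rw [h1, h2, PySem.List.pyGetD_natCast, PySem.List.pyGetD_natCast]
    unfold chooseRowI
    rw [PySem.List.getD_map_range, PySem.List.getD_map_range]
    · rw [Nat.choose_succ_succ']; push_cast; ring
    · omega
    · omega
  rw [List.map_congr_left hmap]
  unfold chooseRowI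
  rw [show m + 1 + 1 = (m + 1) + 1 from rfl, List.range_succ, List.range_succ_eq_map]
  simp [List.map_map, Function.comp]

lemma innerB (t : Int) (m : Nat) (res : List (Int × Int)) :
    (PySem.List.pyRange 1 ((m : Int) + 1) 1).foldl
      (fun res r => if PySem.List.pyGetD (chooseRowI (m + 1)) r 0 > t then res ++ [(((m : Int) + 1), r)] else res)
      res
    = res ++ gRow t ((m : Int) + 1) := by
  have hfun : (fun (res : List (Int × Int)) r => if PySem.List.pyGetD (chooseRowI (m + 1)) r 0 > t then res ++ [(((m : Int) + 1), r)] else res)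
      = (fun (res : List (Int × Int)) r => if decide (PySem.List.pyGetD (chooseRowI (m + 1)) r 0 > t) = true then res ++ [(((m : Int) + 1), r)] else res) := by
    funext res r; simp
  rw [hfun, PySem.List.foldl_append_if]
  unfold gRow
  congr 1
  congr 1
  apply List.filter_congr
  intro r hr
  rw [PySem.List.mem_pyRange_one] at hr
  have h1 : r = ((r.toNat : Nat) : Int) := by omega
  rw [h1, PySem.List.pyGetD_natCast]
  unfold chooseRowI
  rw [PySem.List.getD_map_range]
  · have : ((m : Int) + 1).toNat = m + 1 := by omega
    rw [this, show ((r.toNat : Int)).toNat = r.toNat from by omega]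
  · omega

lemma mainB (t : Int) (m : Nat) :
    ((List.range m).map (fun k : Nat => (1 + (k:Int)))).foldl
      (fun st n =>
        let row := [1] ++ ((PySem.List.pyRange 1 n 1).map
          (fun i => PySem.List.pyGetD st.1 (i - 1) 0 + PySem.List.pyGetD st.1 i 0)) ++ [1]
        (row,
          (PySem.List.pyRange 1 n 1).foldl
            (fun res r => if PySem.List.pyGetD row r 0 > t then res ++ [(n, r)] else res)
            st.2))
      (([1] : List Int), ([] : List (Int × Int)))
    = (chooseRowI m, ((List.range m).map (fun k : Nat => (1 + (k:Int)))).flatMap (gRow t)) := by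
  induction m with
  | zero => simp [chooseRowI]
  | succ m ih =>
    rw [List.range_succ, List.map_append, List.foldl_append, List.flatMap_append, ih]
    simp only [List.map_cons, List.map_nil, List.foldl_cons, List.foldl_nil]
    rw [show (1 + (m:Int)) = (m:Int) + 1 from by ring, rowLemma, innerB]
    simp [gRow]

-- ===== VERDICT (by name: the statement is the Claim_ definition above) =====
theorem q53_spec : Claim_equal_q53 := by
  intro n_limit t _
  unfold Spec_q53 q53 q53_alt
  have hrange : PySem.List.pyRange 1 (n_limit + 1) 1
      = (List.range n_limit.toNat).map (fun k : Nat => (1 + (k:Int))) := by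
    rw [PySem.List.pyRange_one, show (n_limit + 1 - 1) = n_limit from by ring]
  rw [hrange, mainB]
  rw [PySem.List.foldl_congr_mem _ _ (fun acc n => acc ++ gRow t n) _
    (fun acc n _ => innerA t n acc)]
  rw [PySem.List.foldl_append_eq_flatMap]
  simp
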